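-- pv_equiv track=rewrite | github.com/inhahe/GPDA | gpda_scannerless.py | _split_regex
-- ===== SOURCE A (Python) =====
-- def _split_regex(raw):
--     """Given a raw '/pattern/flags' token, return (pattern, flags).
--
--     The pattern may contain escaped slashes; the first unescaped `/` at
--     index 0 opens and the last unescaped `/` closes."""
--     assert raw.startswith('/')
--     # Scan from left to find the closing slash, respecting \-escapes.
--     i = 1
--     while i < len(raw):
--         if raw[i] == '\\' and i + 1 < len(raw):
--             i += 2
--             continue
--         if raw[i] == '/':
--             return raw[1:i], raw[i + 1:]
--         i += 1
--     raise SyntaxError(f'unterminated regex literal: {raw}')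
-- ===== SOURCE B (Python) =====
-- def _split_regex(raw):
--     """Structural re-implementation: consume the char list with an explicit
--     pattern accumulator instead of index arithmetic and slicing."""
--     assert raw.startswith('/')
--     pat = []
--     rest = list(raw[1:])
--     while rest:
--         c = rest.pop(0)
--         if c == '\\' and rest:
--             pat.append(c)
--             pat.append(rest.pop(0))
--         elif c == '/':
--             return ''.join(pat), ''.join(rest)
--         else:
--             pat.append(c)
--     raise SyntaxError(f'unterminated regex literal: {raw}')
-- ===== Notes on version B (the rewrite author's own statement) =====
-- stated objective: alternative
-- what changed: Replaces A's index-based while loop with slicing (raw[1:i], raw[i+1:]) by a structural pop-from-front loop over the character list that builds the pattern in an explicit accumulator; no index arithmetic or slices remain.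
import Mathlib
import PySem

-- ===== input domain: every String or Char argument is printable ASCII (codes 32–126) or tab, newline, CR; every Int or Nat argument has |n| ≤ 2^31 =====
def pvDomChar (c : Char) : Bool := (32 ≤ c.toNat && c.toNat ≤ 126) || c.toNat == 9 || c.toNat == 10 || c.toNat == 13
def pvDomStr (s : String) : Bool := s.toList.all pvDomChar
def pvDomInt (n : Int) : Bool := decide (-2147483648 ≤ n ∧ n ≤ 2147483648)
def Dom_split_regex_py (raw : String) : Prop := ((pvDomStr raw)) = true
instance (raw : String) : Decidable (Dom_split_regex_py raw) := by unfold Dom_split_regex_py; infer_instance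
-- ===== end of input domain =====

-- B replaces A's index/slice scan by a structural pop-front loop with an explicit
-- pattern accumulator (objective: alternative decomposition, same cost).

-- ===== PORT A =====
-- A's while loop: index i over the chars, escape pairs skip two, first unescaped '/'
-- returns the slices raw[1:i], raw[i+1:] (written as drop/take, exact here since
-- 1 ≤ i < length); none = the SyntaxError path.
def splitScanA (s : List Char) (i : Nat) : Option (List Char × List Char) :=
  if i < s.length then
    if s.getD i ' ' = '\\' ∧ i + 1 < s.length then
      splitScanA s (i + 2)
    else if s.getD i ' ' = '/' then
      some ((s.drop 1).take (i - 1), s.drop (i + 1))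
    else
      splitScanA s (i + 1)
  else
    none
termination_by s.length - i

def split_regex_py (raw : String) : String × String :=
  if PySem.Str.startswith raw "/" then
    match splitScanA raw.toList 1 with
    | some (p, f) => (String.ofList p, String.ofList f)
    | none => ("", "")   -- SyntaxError in Python; excluded by Pre_
  else ("", "")          -- AssertionError in Python; excluded by Pre_

-- ===== PORT B =====
-- B's while loop: pop the front char, append to the accumulator (escape pairs as a
-- pair), first unescaped '/' returns (accumulator, remainder).
def splitLoopB : List Char → List Char → Option (List Char × List Char)
  | _, [] => none
  | pat, c :: d :: rest =>
    if c = '\\' then splitLoopB (pat ++ [c, d]) rest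
    else if c = '/' then some (pat, d :: rest)
    else splitLoopB (pat ++ [c]) (d :: rest)
  | pat, [c] =>
    if c = '/' then some (pat, [])
    else splitLoopB (pat ++ [c]) []

def split_regex_py_alt (raw : String) : String × String :=
  match raw.toList with
  | '/' :: rest =>
    match splitLoopB [] rest with
    | some (p, f) => (String.ofList p, String.ofList f)
    | none => ("", "")   -- SyntaxError in Python; excluded by Pre_
  | _ => ("", "")        -- AssertionError in Python; excluded by Pre_

-- ===== PRECONDITION & SPEC =====
-- A raises AssertionError unless raw starts with '/', and SyntaxError when no closing
-- unescaped '/' exists; Pre_ keeps exactly the inputs with a closer: some '/' at an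
-- index i ≥ 1 whose immediately preceding run of backslashes (within indices ≥ 1) is even.
def Pre_split_regex_py (raw : String) : Prop :=
  raw.toList.head? = some '/' ∧
  ∃ i, i < raw.toList.length ∧ 1 ≤ i ∧ raw.toList[i]? = some '/' ∧
    (((raw.toList.take i).drop 1).reverse.takeWhile (· = '\\')).length % 2 = 0
instance (raw : String) : Decidable (Pre_split_regex_py raw) := by
  unfold Pre_split_regex_py; infer_instance

def pvWitness_split_regex_py : String := "/a\\/b/gi"

def Spec_split_regex_py (raw : String) (out : String × String) : Prop := out = split_regex_py_alt raw
instance (raw : String) (out : String × String) : Decidable (Spec_split_regex_py raw out) := by unfold Spec_split_regex_py; infer_instance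

-- ===== CLAIM (what is proved, stated in full; the proofs are below) =====
def Claim_equal_split_regex_py : Prop := ∀ (raw : String), Dom_split_regex_py raw → Pre_split_regex_py raw → Spec_split_regex_py raw (split_regex_py raw)

-- ===== LEMMAS AND PROOFS =====

-- A's scan from index i equals B's loop run with the already-scanned pattern prefix
-- raw[1:i] as accumulator and the unscanned suffix as the remaining list.
theorem splitScanA_eq_splitLoopB (s : List Char) :
    ∀ n i, s.length - i ≤ n → 1 ≤ i →
      splitScanA s i = splitLoopB ((s.drop 1).take (i - 1)) (s.drop i) := by
  intro n
  induction n with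
  | zero =>
    intro i hn _
    have hle : s.length ≤ i := by omega
    rw [splitScanA, if_neg (by omega), List.drop_eq_nil_of_le hle, splitLoopB]
  | succ n ih =>
    intro i hn hi
    by_cases hlt : i < s.length
    · have hdrop : s.drop i = s[i] :: s.drop (i + 1) := List.drop_eq_getElem_cons hlt
      have hgetD : s.getD i ' ' = s[i] := List.getD_eq_getElem s ' ' hlt
      have htake : (s.drop 1).take i = (s.drop 1).take (i - 1) ++ [s[i]] := by
        have h1 : (s.drop 1)[i - 1]? = some s[i] := by
          rw [List.getElem?_drop]
          have h2 : 1 + (i - 1) = i := by omega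
          rw [h2, List.getElem?_eq_getElem hlt]
        have h3 := List.take_add_one (l := s.drop 1) (i := i - 1)
        have h4 : i - 1 + 1 = i := by omega
        rw [h4] at h3
        rw [h3, h1]
        simp
      rw [splitScanA, if_pos hlt, hgetD]
      by_cases hbs : s[i] = '\\'
      · by_cases h2 : i + 1 < s.length
        · rw [if_pos ⟨hbs, h2⟩]
          have hdrop2 : s.drop (i + 1) = s[i+1] :: s.drop (i + 2) := List.drop_eq_getElem_cons h2
          have htake2 : (s.drop 1).take (i + 1) = (s.drop 1).take i ++ [s[i+1]] := by
            have h1 : (s.drop 1)[i]? = some s[i+1] := by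
              rw [List.getElem?_drop]
              have h3 : 1 + i = i + 1 := by omega
              rw [h3, List.getElem?_eq_getElem h2]
            rw [List.take_add_one, h1]
            simp
          rw [hdrop, hdrop2, splitLoopB, if_pos hbs]
          rw [ih (i + 2) (by omega) (by omega)]
          congr 1
          have h21 : i + 2 - 1 = i + 1 := by omega
          rw [h21, htake2, htake, hbs]
          simp
        · -- lone trailing backslash: both sides run off the end
          rw [if_neg (fun h => absurd h.2 (by omega)), if_neg (by rw [hbs]; decide), hdrop]
          have hA : splitScanA s (i + 1) = none := by
            rw [splitScanA, if_neg (by omega)]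
          have hnil : s.drop (i + 1) = [] := List.drop_eq_nil_of_le (by omega)
          rw [hA, hnil, splitLoopB, if_neg (by rw [hbs]; decide), splitLoopB]
      · by_cases hsl : s[i] = '/'
        · rw [if_neg (by simp [hbs]), if_pos hsl, hdrop, hsl]
          cases hdd : s.drop (i + 1) with
          | nil => rw [splitLoopB, if_pos rfl]
          | cons d rest => rw [splitLoopB, if_neg (by decide), if_pos rfl]
        · rw [if_neg (by simp [hbs]), if_neg hsl, hdrop]
          have hrec := ih (i + 1) (by omega) (by omega)
          have h11 : i + 1 - 1 = i := by omega
          rw [h11, htake] at hrec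
          cases hdd : s.drop (i + 1) with
          | nil =>
            rw [splitLoopB, if_neg hsl, hrec, hdd]
          | cons d rest =>
            rw [splitLoopB, if_neg hbs, if_neg hsl, hrec, hdd]
    · have hle : s.length ≤ i := by omega
      rw [splitScanA, if_neg (by omega), List.drop_eq_nil_of_le hle, splitLoopB]

theorem startswith_slash (raw : String) (rest : List Char)
    (h : raw.toList = '/' :: rest) :
    PySem.Str.startswith raw "/" = true := by
  rw [PySem.Str.startswith_eq, PySem.Chars.startswith_iff, h]
  exact ⟨rest, rfl⟩

-- ===== VERDICT (by name: the statement is the Claim_ definition above) =====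
theorem split_regex_py_spec : Claim_equal_split_regex_py := by
  intro raw _ hpre
  obtain ⟨hhead, -⟩ := hpre
  unfold Spec_split_regex_py split_regex_py split_regex_py_alt
  cases h : raw.toList with
  | nil => rw [h] at hhead; exact absurd hhead (by simp)
  | cons c rest =>
    have hc : c = '/' := by rw [h] at hhead; simpa using hhead
    subst hc
    rw [startswith_slash raw rest h]
    have hkey := splitScanA_eq_splitLoopB ('/' :: rest) (('/' :: rest).length) 1 (by omega) le_rfl
    simp only [List.take_zero, List.drop_succ_cons,
      List.drop_zero, Nat.sub_self] at hkey
    rw [hkey]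
    simp
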